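-- pv_equiv track=rewrite | github.com/rit-git/opinedb_public | extractor/code/mine_tips.py | handle_punct
-- ===== SOURCE A (Python) =====
-- def handle_punct(text):
--     # for the trustyou dataset
--     text = text.replace("''", "'")
--     new_text = ''
--     i = 0
--     N = len(text)
--     while i < len(text):
--         curr_chr = text[i]
--         new_text += curr_chr
--         if i > 0 and i < N - 1:
--             next_chr = text[i + 1]
--             prev_chr = text[i - 1]
--             if next_chr.isalnum() and prev_chr.isalnum() and curr_chr in '.,?()!':
--                 new_text += ' '
--         i += 1
--     return new_text
-- ===== SOURCE B (Python) =====
-- import re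
--
-- def handle_punct(text):
--     # for the trustyou dataset
--     text = text.replace("''", "'")
--
--     def repl(m):
--         if m.group(1).isalnum() and m.group(2).isalnum():
--             return m.group(0) + ' '
--         return m.group(0)
--
--     # zero-width lookarounds keep the scan single-pass and non-consuming,
--     # so adjacent punctuation is handled exactly like the original loop
--     return re.sub(r"(?<=(.))[.,?()!](?=(.))", repl, text)
-- ===== Notes on version B (the rewrite author's own statement) =====
-- stated objective: idiomatic
-- what changed: Replaced the index-based while loop with string concatenation by a single re.sub over a one-char punctuation pattern with zero-width lookbehind/lookahead and an isalnum callback.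
import Mathlib
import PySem

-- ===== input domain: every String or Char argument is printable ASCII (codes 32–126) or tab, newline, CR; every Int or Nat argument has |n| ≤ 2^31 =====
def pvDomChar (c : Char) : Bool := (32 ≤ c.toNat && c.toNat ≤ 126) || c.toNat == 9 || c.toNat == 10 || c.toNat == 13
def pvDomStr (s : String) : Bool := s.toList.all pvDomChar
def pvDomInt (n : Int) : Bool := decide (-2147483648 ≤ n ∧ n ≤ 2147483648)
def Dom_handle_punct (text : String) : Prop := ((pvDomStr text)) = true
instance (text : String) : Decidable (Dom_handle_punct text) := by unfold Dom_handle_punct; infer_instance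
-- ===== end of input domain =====

-- B replaces A's index-based while loop (with quadratic string +=) by a single
-- re.sub with zero-width lookarounds and an isalnum callback; same return value.

-- ===== PORT A =====
-- the punctuation string '.,?()!' ; `curr_chr in '.,?()!'` is membership of the char
def pvPunct : List Char := ['.', ',', '?', '(', ')', '!']

-- the while loop: i counts up, new_text accumulates curr plus an optional space
def pvLoopA (cs : List Char) (N : Nat) (i : Nat) : List Char :=
  if h : i < cs.length then
    let curr := cs[i]
    let extra :=
      if 0 < i ∧ i < N - 1 then
        let next := cs.getD (i + 1) ' '
        let prev := cs.getD (i - 1) ' '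
        if PySem.Chars.isalnum next && PySem.Chars.isalnum prev && pvPunct.contains curr then
          [' ']
        else []
      else []
    curr :: extra ++ pvLoopA cs N (i + 1)
  else []
termination_by cs.length - i

def handle_punct (text : String) : String :=
  let text := PySem.Str.replace text "''" "'"
  let cs := text.toList
  String.ofList (pvLoopA cs cs.length 0)

-- ===== PORT B =====
-- Hand port of re.sub(r"(?<=(.))[.,?()!](?=(.))", repl, text): every match is a
-- single punctuation character and both lookarounds are zero-width, so re.sub's
-- left-to-right scan visits each character once carrying the previous character;
-- '.' in a lookaround matches any character except '\n'. Exact for this pattern.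
def pvSubScan (prev : Option Char) (cs : List Char) : List Char :=
  match cs with
  | [] => []
  | c :: rest =>
    let matched : Bool := pvPunct.contains c
      && (match prev with | some p => decide (p ≠ '\n') | none => false)      -- lookbehind (.)
      && (match rest.head? with | some n => decide (n ≠ '\n') | none => false) -- lookahead (.)
    if matched then
      -- replacement callback: group(0) + ' ' iff both captured neighbours are alnum
      let g1 := prev.getD ' '
      let g2 := rest.head?.getD ' '
      (if PySem.Chars.isalnum g1 && PySem.Chars.isalnum g2 then [c, ' '] else [c])
        ++ pvSubScan (some c) rest
    else
      c :: pvSubScan (some c) rest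

def handle_punct_alt (text : String) : String :=
  let text := PySem.Str.replace text "''" "'"
  String.ofList (pvSubScan none text.toList)

-- ===== PRECONDITION & SPEC =====
def Spec_handle_punct (text : String) (out : String) : Prop := out = handle_punct_alt text
instance (text : String) (out : String) : Decidable (Spec_handle_punct text out) := by unfold Spec_handle_punct; infer_instance

-- ===== CLAIM (what is proved, stated in full; the proofs are below) =====
def Claim_equal_handle_punct : Prop := ∀ (text : String), Dom_handle_punct text → Spec_handle_punct text (handle_punct text)

-- ===== LEMMAS AND PROOFS =====

-- one interior position: A's "append space" test vs the regex match + callback, abstractly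
lemma pvStep (c p nx : Char) (t : List Char) :
    c :: (if (PySem.Chars.isalnum nx && PySem.Chars.isalnum p && pvPunct.contains c) = true
            then [' '] else []) ++ t
    = if (pvPunct.contains c && decide (p ≠ '\n') && decide (nx ≠ '\n')) = true then
        (if (PySem.Chars.isalnum p && PySem.Chars.isalnum nx) = true then [c, ' '] else [c]) ++ t
      else c :: t := by
  by_cases hp : p = '\n'
  · subst hp
    simp [(by decide : PySem.Chars.isalnum '\n' = false)]
  · by_cases hn : nx = '\n'
    · subst hn
      simp [hp, (by decide : PySem.Chars.isalnum '\n' = false)]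
    · simp only [hp, hn, ne_eq, not_false_eq_true, decide_true, Bool.and_true]
      cases hc : pvPunct.contains c <;>
        cases h1 : PySem.Chars.isalnum p <;>
          cases h2 : PySem.Chars.isalnum nx <;> simp

lemma pvScan_eq (cs : List Char) :
    ∀ n i, cs.length - i = n →
      pvLoopA cs cs.length i = pvSubScan (if i = 0 then none else cs[i-1]?) (cs.drop i) := by
  intro n
  induction n with
  | zero =>
    intro i h
    have hle : cs.length ≤ i := by omega
    rw [List.drop_eq_nil_of_le hle]
    unfold pvLoopA
    rw [dif_neg (by omega)]
    simp [pvSubScan]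
  | succ n ih =>
    intro i h
    have hi : i < cs.length := by omega
    rw [List.drop_eq_getElem_cons hi]
    unfold pvLoopA
    rw [dif_pos hi]
    have hrec := ih (i + 1) (by omega)
    have hget : cs[i]? = some cs[i] := List.getElem?_eq_getElem hi
    simp only [Nat.add_sub_cancel, if_neg (Nat.succ_ne_zero i), hget] at hrec
    simp only [pvSubScan, List.head?_drop]
    by_cases h0 : i = 0
    · subst h0
      simp [hrec]
    · rw [if_neg h0]
      have hp : cs[i-1]? = some cs[i-1] := List.getElem?_eq_getElem (by omega)
      rw [hp]
      by_cases hlast : i + 1 < cs.length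
      · have hn : cs[i+1]? = some cs[i+1] := List.getElem?_eq_getElem hlast
        have hcond : 0 < i ∧ i < cs.length - 1 := ⟨by omega, by omega⟩
        rw [hn, if_pos hcond,
          List.getD_eq_getElem cs ' ' hlast,
          List.getD_eq_getElem cs ' ' (by omega : i - 1 < cs.length), hrec]
        exact pvStep cs[i] cs[i-1] cs[i+1] _
      · have hn : cs[i+1]? = none := List.getElem?_eq_none (by omega)
        have hcond : ¬ (0 < i ∧ i < cs.length - 1) := by omega
        simp [hn, hcond, hrec]

-- ===== VERDICT (by name: the statement is the Claim_ definition above) =====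
theorem handle_punct_spec : Claim_equal_handle_punct := by
  intro text _
  unfold Spec_handle_punct handle_punct handle_punct_alt
  exact congrArg String.ofList (pvScan_eq _ _ 0 rfl)
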